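-- pv_equiv track=rewrite | github.com/pypi-data/pypi-mirror-201 | packages/textelixir/textelixir-1.0.4.tar.gz/textelixir-1.0.4/textelixir/search.py | flatten_indices
-- ===== SOURCE A (Python) =====
-- def flatten_indices(indices):
--     # Takes the combined dict when searching for phrases and flattens it into a dictionary with word id -> search word index
--     flattened = {}
--     for k, v in indices.items():
--         for i in v:
--             if i[0] not in flattened:
--                 flattened[i[0]] = [k]
--             else:
--                 flattened[i[0]].append(k)
--     return dict(sorted(flattened.items(), key=lambda x: x[0]))
-- ===== SOURCE B (Python) =====
-- def flatten_indices(indices):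
--     # Flatten to (word_id, search_key) pairs, then build each bucket by a
--     # filter over the flat list, for the distinct word ids in sorted order.
--     pairs = [(i[0], k) for k, v in indices.items() for i in v]
--     words = sorted(set(p[0] for p in pairs))
--     return {w: [k for (x, k) in pairs if x == w] for w in words}
-- ===== Notes on version B (the rewrite author's own statement) =====
-- stated objective: alternative
-- what changed: Replaces the incrementally built dict (membership test + insert/append per pair, then a sort of the items) by a flat (word_id, key) pair list from which each bucket is recomputed by a filter, keyed by the sorted distinct word ids.
import Mathlib
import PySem

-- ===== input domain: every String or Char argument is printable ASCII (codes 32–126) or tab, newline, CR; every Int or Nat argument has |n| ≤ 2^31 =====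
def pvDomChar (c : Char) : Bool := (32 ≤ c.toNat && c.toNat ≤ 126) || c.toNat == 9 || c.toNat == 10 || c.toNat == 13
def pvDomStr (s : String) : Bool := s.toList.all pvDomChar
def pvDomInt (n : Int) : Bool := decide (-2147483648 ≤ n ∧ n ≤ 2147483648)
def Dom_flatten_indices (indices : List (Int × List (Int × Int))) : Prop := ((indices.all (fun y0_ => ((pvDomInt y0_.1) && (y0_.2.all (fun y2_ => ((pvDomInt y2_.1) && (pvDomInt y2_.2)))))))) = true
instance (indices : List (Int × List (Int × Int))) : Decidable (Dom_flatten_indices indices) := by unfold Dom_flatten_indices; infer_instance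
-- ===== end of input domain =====

-- B replaces A's incrementally built dict by a flat pair list with a per-word filter (alternative decomposition; return value only).

-- ===== PORT A =====
def flatten_indices (indices : List (Int × List (Int × Int))) : List (Int × List Int) :=
  let flattened : PySem.Dict Int (List Int) :=
    indices.foldl (fun d kv =>
      kv.2.foldl (fun d i =>
        if d.contains i.1 = false then d.insert i.1 [kv.1]
        else d.modify i.1 [] (fun l => l ++ [kv.1])) d) PySem.Dict.empty
  PySem.List.sorted flattened.items (fun x => x.1) false

-- ===== PORT B =====
def flatten_indices_alt (indices : List (Int × List (Int × Int))) : List (Int × List Int) :=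
  let pairs : List (Int × Int) := indices.flatMap (fun kv => kv.2.map (fun i => (i.1, kv.1)))
  let words : List Int := PySem.List.sorted (PySem.Set.ofList (pairs.map (fun p => p.1))) (fun x => x) false
  words.map (fun w => (w, (pairs.filter (fun p => p.1 == w)).map (fun p => p.2)))

-- ===== PRECONDITION & SPEC =====
def Spec_flatten_indices (indices : List (Int × List (Int × Int))) (out : List (Int × List Int)) : Prop := out = flatten_indices_alt indices
instance (indices : List (Int × List (Int × Int))) (out : List (Int × List Int)) : Decidable (Spec_flatten_indices indices out) := by unfold Spec_flatten_indices; infer_instance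

-- ===== CLAIM (what is proved, stated in full; the proofs are below) =====
def Claim_equal_flatten_indices : Prop := ∀ (indices : List (Int × List (Int × Int))), Dom_flatten_indices indices → Spec_flatten_indices indices (flatten_indices indices)

-- ===== LEMMAS AND PROOFS =====

-- A's branching step is exactly 'modify with default []'.
theorem stepA_eq_modify (d : PySem.Dict Int (List Int)) (w k : Int) :
    (if d.contains w = false then d.insert w [k]
     else d.modify w [] (fun l => l ++ [k])) = d.modify w [] (fun l => l ++ [k]) := by
  by_cases h : d.contains w = false
  · simp only [h, if_true]
    unfold PySem.Dict.modify
    rw [PySem.Dict.getD_of_not_contains _ _ h]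
    rfl
  · simp [h]

-- The nested loop of A is the single fold of 'modify' over the flattened pair list.
theorem flattened_eq_foldl_pairs (indices : List (Int × List (Int × Int))) :
    indices.foldl (fun d kv =>
      kv.2.foldl (fun d i =>
        if d.contains i.1 = false then d.insert i.1 [kv.1]
        else d.modify i.1 [] (fun l => l ++ [kv.1])) d) PySem.Dict.empty
    = (indices.flatMap (fun kv => kv.2.map (fun i => (i.1, kv.1)))).foldl
        (fun d p => d.modify p.1 [] (fun l => l ++ [p.2])) PySem.Dict.empty := by
  suffices h : ∀ (l : List (Int × List (Int × Int))) (d : PySem.Dict Int (List Int)),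
      l.foldl (fun d kv =>
        kv.2.foldl (fun d i =>
          if d.contains i.1 = false then d.insert i.1 [kv.1]
          else d.modify i.1 [] (fun l => l ++ [kv.1])) d) d
      = (l.flatMap (fun kv => kv.2.map (fun i => (i.1, kv.1)))).foldl
          (fun d p => d.modify p.1 [] (fun l => l ++ [p.2])) d by
    exact h indices PySem.Dict.empty
  intro l
  induction l with
  | nil => intro d; rfl
  | cons kv rest ih =>
    intro d
    rw [List.foldl_cons, ih, List.flatMap_cons, List.foldl_append]
    simp only [List.foldl_map, stepA_eq_modify]

theorem flatten_indices_spec : Claim_equal_flatten_indices := by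
  intro indices _
  unfold Spec_flatten_indices flatten_indices flatten_indices_alt
  simp only []
  set pairs : List (Int × Int) := indices.flatMap (fun kv => kv.2.map (fun i => (i.1, kv.1))) with hpairs
  set D : PySem.Dict Int (List Int) :=
    pairs.foldl (fun d p => d.modify p.1 [] (fun l => l ++ [p.2])) PySem.Dict.empty with hD
  rw [flattened_eq_foldl_pairs, ← hpairs, ← hD]
  have hnodup : D.keys.Nodup := by
    rw [hD]
    exact PySem.Dict.nodup_keys_foldl_modify_key pairs (fun p => p.1) []
      (fun d p l => l ++ [p.2]) PySem.Dict.empty PySem.Dict.nodup_keys_empty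
  have hkeys : D.keys = PySem.Set.ofList (pairs.map (fun p => p.1)) := by
    rw [hD, PySem.Dict.keys_foldl_modify_key pairs (fun p => p.1) []
      (fun d p l => l ++ [p.2]) PySem.Dict.empty]
    simp [PySem.Dict.keys_empty, PySem.Set.update_nil_left]
  have hgetD : ∀ c : Int, D.getD c [] = (pairs.filter (fun p => p.1 == c)).map (fun p => p.2) := by
    intro c
    rw [hD, PySem.Dict.getD_foldl_modify_append]
    simp [PySem.Dict.getD_empty]
  have hitems : D.items = D.keys.map (fun k => (k, D.getD k [])) :=
    PySem.Dict.items_eq_map_keys D hnodup []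
  have hperm :
      ((PySem.List.sorted (PySem.Set.ofList (pairs.map (fun p => p.1))) (fun x => x)).map
        (fun k => (k, D.getD k []))).Perm D.items := by
    rw [hitems, hkeys]
    exact (PySem.List.sorted_perm _ _ false).map _
  have hpw :
      List.Pairwise (fun a b : Int × List Int => a.1 < b.1)
        ((PySem.List.sorted (PySem.Set.ofList (pairs.map (fun p => p.1))) (fun x => x)).map
          (fun k => (k, D.getD k []))) := by
    rw [List.pairwise_map]
    exact PySem.List.sorted_ofList_pairwise_lt _
  rw [PySem.List.sorted_eq_of_perm_of_pairwise_lt D.items _ (fun x => x.1) hperm hpw]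
  apply List.map_congr_left
  intro w _
  simp [hgetD w]
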